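-- pv_equiv track=rewrite | github.com/coder-yuzhiwei/iechub | NLP Learning Schedule/QA System/project_job_bot/actions/sparql.py | str2Salary
-- ===== SOURCE A (Python) =====
-- def str2Salary(salary):
--     l = 0  # 下限
--     r = 0  # 上限
--     flag = True
--     for i in salary:
--         if i.isdigit():
--             if flag:
--                 l = l * 10 + int(i)
--             else:
--                 r = r * 10 + int(i)
--         else:
--             flag = False
--
--     if l > r:
--         tmp = l
--         l = r
--         r = tmp
--     return l, r
-- ===== SOURCE B (Python) =====
-- def str2Salary(salary):
--     i = 0
--     while i < len(salary) and salary[i].isdigit():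
--         i += 1
--     l = int(salary[:i]) if i else 0
--     right = ''.join(c for c in salary[i + 1:] if c.isdigit())
--     r = int(right) if right else 0
--     return (l, r) if l <= r else (r, l)
-- ===== Notes on version B (the rewrite author's own statement) =====
-- stated objective: simpler
-- what changed: Instead of a stateful flag-driven digit accumulator loop, B splits the string at the first non-digit, parses the leading digit prefix as the lower bound and the digits after that separator as the upper bound, then orders the pair.
import Mathlib
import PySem

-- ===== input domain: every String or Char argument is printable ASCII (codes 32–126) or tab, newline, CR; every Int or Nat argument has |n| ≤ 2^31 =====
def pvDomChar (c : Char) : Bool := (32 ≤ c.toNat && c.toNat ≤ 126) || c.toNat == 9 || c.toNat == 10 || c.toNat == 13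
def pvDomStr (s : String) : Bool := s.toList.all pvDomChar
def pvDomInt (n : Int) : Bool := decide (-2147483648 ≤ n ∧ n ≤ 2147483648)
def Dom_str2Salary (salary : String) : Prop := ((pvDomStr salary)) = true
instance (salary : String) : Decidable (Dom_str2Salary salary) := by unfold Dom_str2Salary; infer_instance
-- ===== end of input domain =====

-- B replaces A's flag-driven accumulator loop by split-at-first-non-digit parsing; objective: simpler.


-- ===== PORT A =====
-- int(i) for a single digit char i: its digit value (exact on ASCII digits)
def pvDigitVal (c : Char) : Int := (c.toNat : Int) - 48

-- loop body of A: state (l, r, flag)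
def pvStepA (s : Int × Int × Bool) (c : Char) : Int × Int × Bool :=
  if c.isDigit then
    if s.2.2 then (s.1 * 10 + pvDigitVal c, s.2.1, s.2.2)
    else (s.1, s.2.1 * 10 + pvDigitVal c, s.2.2)
  else (s.1, s.2.1, false)

def str2Salary (salary : String) : Int × Int :=
  let res := salary.toList.foldl pvStepA (0, 0, true)
  if res.1 > res.2.1 then (res.2.1, res.1) else (res.1, res.2.1)

-- ===== PORT B =====
-- int(<digit string>), with 0 for the empty string (B's `if i else 0` / `if right else 0`)
def pvDigitsToInt (cs : List Char) : Int := cs.foldl (fun a c => a * 10 + pvDigitVal c) 0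

def str2Salary_alt (salary : String) : Int × Int :=
  let cs := salary.toList
  let l := pvDigitsToInt (cs.takeWhile Char.isDigit)          -- salary[:i], i = first non-digit index
  let rest := (cs.dropWhile Char.isDigit).drop 1               -- salary[i+1:]
  let r := pvDigitsToInt (rest.filter Char.isDigit)
  if l ≤ r then (l, r) else (r, l)

-- ===== PRECONDITION & SPEC =====
def Spec_str2Salary (salary : String) (out : Int × Int) : Prop := out = str2Salary_alt salary
instance (salary : String) (out : Int × Int) : Decidable (Spec_str2Salary salary out) := by unfold Spec_str2Salary; infer_instance

-- ===== CLAIM (what is proved, stated in full; the proofs are below) =====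
def Claim_equal_str2Salary : Prop := ∀ (salary : String), Dom_str2Salary salary → Spec_str2Salary salary (str2Salary salary)

-- ===== LEMMAS AND PROOFS =====
theorem foldA_false (cs : List Char) : ∀ (l r : Int),
    List.foldl pvStepA (l, r, false) cs
      = (l, List.foldl (fun a c => a * 10 + pvDigitVal c) r (cs.filter Char.isDigit), false) := by
  induction cs with
  | nil => intro l r; simp
  | cons c cs ih =>
    intro l r
    by_cases h : c.isDigit <;> simp [pvStepA, h, ih]

theorem foldA_true (cs : List Char) : ∀ (l r : Int),
    (List.foldl pvStepA (l, r, true) cs).1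
        = List.foldl (fun a c => a * 10 + pvDigitVal c) l (cs.takeWhile Char.isDigit) ∧
    (List.foldl pvStepA (l, r, true) cs).2.1
        = List.foldl (fun a c => a * 10 + pvDigitVal c) r
            (((cs.dropWhile Char.isDigit).drop 1).filter Char.isDigit) := by
  induction cs with
  | nil => intro l r; simp
  | cons c cs ih =>
    intro l r
    by_cases h : c.isDigit
    · simpa [pvStepA, h, List.takeWhile_cons, List.dropWhile_cons] using ih (l * 10 + pvDigitVal c) r
    · simp [pvStepA, h, List.takeWhile_cons, List.dropWhile_cons, foldA_false]

theorem str2Salary_spec : Claim_equal_str2Salary := by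
  intro salary _
  unfold Spec_str2Salary str2Salary str2Salary_alt pvDigitsToInt
  obtain ⟨h1, h2⟩ := foldA_true salary.toList 0 0
  simp only [h1, h2]
  split_ifs <;> first | rfl | omega
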